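-- pv_equiv track=rewrite | github.com/SiddharthAgrawal3008/Equity-research-platform | backend/engines/engine_4_nlp.py | _split_prepared_qna
-- ===== SOURCE A (Python) =====
-- _QNA_MARKERS: tuple[str, ...] = (
--     "question-and-answer session",
--     "question and answer session",
--     "we will now begin the question",
--     "open the call for questions",
--     "our first question comes",
--     "move to the q&a",
--     "begin our q&a",
-- )
--
-- def _split_prepared_qna(text: str) -> tuple[str, str]:
--     """Split transcript into (prepared_remarks, qna) using heuristic markers.
--
--     If no marker is found the entire text is treated as prepared remarks
--     and the Q&A half is empty.
--     """
--     if not text: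
--         return ("", "")
--     lower = text.lower()
--     split_at: int | None = None
--     for marker in _QNA_MARKERS:
--         idx = lower.find(marker)
--         if idx != -1 and (split_at is None or idx < split_at):
--             split_at = idx
--     if split_at is None:
--         return (text, "")
--     return (text[:split_at], text[split_at:])
-- ===== SOURCE B (Python) =====
-- _QNA_MARKERS: tuple[str, ...] = (
--     "question-and-answer session",
--     "question and answer session",
--     "we will now begin the question",
--     "open the call for questions",
--     "our first question comes",
--     "move to the q&a",
--     "begin our q&a",
-- )
--
-- def _split_prepared_qna(text: str) -> tuple[str, str]:
--     """Split transcript into (prepared_remarks, qna) at the earliest marker.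
--
--     Single left-to-right scan: stop at the first position where any marker
--     starts, instead of running a separate find() per marker and taking the min.
--     """
--     lower = text.lower()
--     for i in range(len(lower)):
--         if any(lower.startswith(m, i) for m in _QNA_MARKERS):
--             return (text[:i], text[i:])
--     return (text, "")
-- ===== Notes on version B (the rewrite author's own statement) =====
-- stated objective: alternative
-- what changed: Replaces seven independent str.find passes plus a running minimum with a single left-to-right scan that returns at the first position where any marker starts; the empty-text guard disappears because the scan handles it naturally.
import Mathlib
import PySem

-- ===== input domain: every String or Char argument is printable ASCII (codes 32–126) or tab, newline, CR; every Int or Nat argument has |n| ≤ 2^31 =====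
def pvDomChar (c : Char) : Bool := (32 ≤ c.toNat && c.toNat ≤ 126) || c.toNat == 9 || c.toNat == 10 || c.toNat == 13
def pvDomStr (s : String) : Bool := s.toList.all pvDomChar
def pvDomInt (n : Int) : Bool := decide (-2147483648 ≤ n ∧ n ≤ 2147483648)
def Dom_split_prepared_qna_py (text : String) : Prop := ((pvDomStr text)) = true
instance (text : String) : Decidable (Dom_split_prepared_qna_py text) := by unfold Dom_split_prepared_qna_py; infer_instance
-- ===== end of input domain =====

-- B replaces A's seven independent find passes + running minimum with one left-to-right
-- scan returning at the first position where any marker starts (objective: alternative).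

-- ===== PORT A =====
def pvQnaMarkers : List String :=
  ["question-and-answer session",
   "question and answer session",
   "we will now begin the question",
   "open the call for questions",
   "our first question comes",
   "move to the q&a",
   "begin our q&a"]

def split_prepared_qna_py (text : String) : String × String :=
  if PySem.Str.len text = 0 then ("", "")
  else
    let lower := PySem.Str.lower text
    let split_at : Option Int := pvQnaMarkers.foldl (fun sa marker =>
      let idx := PySem.Str.find lower marker
      if idx != -1 && (match sa with | none => true | some s => decide (idx < s)) then some idx else sa)
      none
    match split_at with
    | none => (text, "")
    | some s => (PySem.Str.slice text none (some s), PySem.Str.slice text (some s) none)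

-- ===== PORT B =====
-- any(lower.startswith(m, i) for m in _QNA_MARKERS), with rest = lower[i:]
def pvAnyMarkerAt (rest : List Char) : Bool :=
  pvQnaMarkers.any (fun m => PySem.Chars.startswith rest m.toList)

-- the 'for i in range(len(lower))' loop: rest is the suffix lower[i:]
def pvScan : List Char → Nat → Option Nat
  | [], _ => none
  | c :: tl, i => if pvAnyMarkerAt (c :: tl) then some i else pvScan tl (i + 1)

def split_prepared_qna_py_alt (text : String) : String × String :=
  let lower := PySem.Chars.lower text.toList
  match pvScan lower 0 with
  | none => (text, "")
  | some i => (String.ofList (text.toList.take i), String.ofList (text.toList.drop i))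

-- ===== PRECONDITION & SPEC =====
def Spec_split_prepared_qna_py (text : String) (out : String × String) : Prop := out = split_prepared_qna_py_alt text
instance (text : String) (out : String × String) : Decidable (Spec_split_prepared_qna_py text out) := by unfold Spec_split_prepared_qna_py; infer_instance

-- ===== CLAIM (what is proved, stated in full; the proofs are below) =====
def Claim_equal_split_prepared_qna_py : Prop := ∀ (text : String), Dom_split_prepared_qna_py text → Spec_split_prepared_qna_py text (split_prepared_qna_py text)

-- ===== LEMMAS AND PROOFS =====

-- proof-side name for A's fold step (definitionally the lambda in the port)
def pvStep (lower : String) (sa : Option Int) (marker : String) : Option Int :=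
  let idx := PySem.Str.find lower marker
  if idx != -1 && (match sa with | none => true | some s => decide (idx < s))
  then some idx else sa

theorem pvStep_eq_or (lower : String) (sa : Option Int) (m : String) :
    (pvStep lower sa m = some (PySem.Str.find lower m) ∧ PySem.Str.find lower m ≠ -1 ∧
        ∀ s, sa = some s → PySem.Str.find lower m < s)
    ∨ (pvStep lower sa m = sa ∧
        (PySem.Str.find lower m = -1 ∨ ∃ s, sa = some s ∧ s ≤ PySem.Str.find lower m)) := by
  simp only [pvStep]
  generalize PySem.Str.find lower m = idx
  cases sa with
  | none =>
    by_cases hne : idx = -1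
    · subst hne; exact Or.inr ⟨by simp, Or.inl rfl⟩
    · exact Or.inl ⟨by simp [hne], hne, by simp⟩
  | some s =>
    by_cases hne : idx = -1
    · subst hne; exact Or.inr ⟨by simp, Or.inl rfl⟩
    · by_cases hlt : idx < s
      · refine Or.inl ⟨by simp [hne, hlt], hne, ?_⟩
        intro s' hs'
        obtain rfl := Option.some.inj hs'
        exact hlt
      · exact Or.inr ⟨by simp [hlt], Or.inr ⟨s, rfl, by omega⟩⟩

theorem pv_foldA_none (lower : String) (ms : List String) (sa : Option Int)
    (h : ms.foldl (pvStep lower) sa = none) :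
    sa = none ∧ ∀ m ∈ ms, PySem.Str.find lower m = -1 := by
  induction ms generalizing sa with
  | nil => exact ⟨h, by simp⟩
  | cons m tl ih =>
    rw [List.foldl_cons] at h
    obtain ⟨h1, h2⟩ := ih _ h
    rcases pvStep_eq_or lower sa m with ⟨hstep, -, -⟩ | ⟨hstep, hrest⟩
    · rw [hstep] at h1; simp at h1
    · rw [hstep] at h1
      subst h1
      have hne : PySem.Str.find lower m = -1 := by
        rcases hrest with hne | ⟨s, hs, -⟩
        · exact hne
        · simp at hs
      refine ⟨rfl, ?_⟩
      intro m' hm'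
      rcases List.mem_cons.mp hm' with rfl | hm'
      · exact hne
      · exact h2 m' hm'

theorem pv_foldA_some (lower : String) (ms : List String) (sa : Option Int) (v : Int)
    (h : ms.foldl (pvStep lower) sa = some v) :
    (sa = some v ∨ ∃ m ∈ ms, PySem.Str.find lower m = v ∧ v ≠ -1) ∧
      (∀ m ∈ ms, PySem.Str.find lower m = -1 ∨ v ≤ PySem.Str.find lower m) ∧
      (∀ s, sa = some s → v ≤ s) := by
  induction ms generalizing sa with
  | nil =>
    simp only [List.foldl_nil] at h
    exact ⟨Or.inl h, by simp, fun s hs => by rw [hs] at h; obtain rfl := Option.some.inj h; omega⟩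
  | cons m tl ih =>
    rw [List.foldl_cons] at h
    obtain ⟨ih1, ih2, ih3⟩ := ih _ h
    rcases pvStep_eq_or lower sa m with ⟨hstep, hne, hlt⟩ | ⟨hstep, hrest⟩
    · rw [hstep] at ih1 ih3
      have hvle : v ≤ PySem.Str.find lower m := ih3 _ rfl
      refine ⟨?_, ?_, ?_⟩
      · rcases ih1 with h1 | ⟨m', hm', hf', hv'⟩
        · obtain hfv := Option.some.inj h1
          exact Or.inr ⟨m, by simp, hfv, hfv ▸ hne⟩
        · exact Or.inr ⟨m', by simp [hm'], hf', hv'⟩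
      · intro m' hm'
        rcases List.mem_cons.mp hm' with rfl | hm'
        · exact Or.inr hvle
        · exact ih2 m' hm'
      · intro s hs
        have := hlt s hs
        omega
    · rw [hstep] at ih1 ih3
      refine ⟨?_, ?_, ih3⟩
      · rcases ih1 with h1 | ⟨m', hm', hf', hv'⟩
        · exact Or.inl h1
        · exact Or.inr ⟨m', by simp [hm'], hf', hv'⟩
      · intro m' hm'
        rcases List.mem_cons.mp hm' with rfl | hm'
        · rcases hrest with hne | ⟨s, hsa, hle⟩
          · exact Or.inl hne
          · have := ih3 s hsa
            exact Or.inr (by omega)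
        · exact ih2 m' hm'

-- any marker starts at the head of rest  ↔  pvAnyMarkerAt rest
theorem pv_hit_iff (rest : List Char) :
    pvAnyMarkerAt rest = true ↔ ∃ m ∈ pvQnaMarkers, m.toList <+: rest := by
  simp [pvAnyMarkerAt, List.any_eq_true, PySem.Chars.startswith_iff]

theorem pv_find_neg_no_occ (s sub : List Char) (j : Nat)
    (h : PySem.Chars.find s sub = -1) : ¬ sub <+: s.drop j := by
  rw [PySem.Chars.find_eq_neg_one_iff] at h
  intro hp
  exact h ((PySem.Chars.isIn_iff_infix sub s).mp
    ((PySem.Chars.exists_prefix_drop_iff_isIn sub s).mp ⟨j, hp⟩))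

theorem pvScan_none (rest : List Char) (i : Nat) (h : pvScan rest i = none) :
    ∀ j, pvAnyMarkerAt (rest.drop j) = false := by
  induction rest generalizing i with
  | nil => intro j; rw [List.drop_nil]; decide
  | cons c tl ih =>
    intro j
    by_cases hh : pvAnyMarkerAt (c :: tl) = true
    · simp [pvScan, hh] at h
    · rw [pvScan, if_neg hh] at h
      cases j with
      | zero => simpa using hh
      | succ j => simpa using ih (i + 1) h j

theorem pvScan_some (rest : List Char) (i k : Nat) (h : pvScan rest i = some k) :
    i ≤ k ∧ pvAnyMarkerAt (rest.drop (k - i)) = true ∧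
      ∀ j < k - i, pvAnyMarkerAt (rest.drop j) = false := by
  induction rest generalizing i with
  | nil => simp [pvScan] at h
  | cons c tl ih =>
    by_cases hh : pvAnyMarkerAt (c :: tl) = true
    · rw [pvScan, if_pos hh] at h
      obtain rfl : i = k := by simpa using h
      exact ⟨le_refl i, by simpa using hh, fun j hj => by omega⟩
    · rw [pvScan, if_neg hh] at h
      obtain ⟨h1, h2, h3⟩ := ih (i + 1) h
      refine ⟨by omega, ?_, ?_⟩
      · have hk : k - i = (k - (i + 1)) + 1 := by omega
        rw [hk]; simpa using h2
      · intro j hj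
        cases j with
        | zero => simpa using hh
        | succ j =>
          have := h3 j (by omega)
          simpa using this

-- A's body, for nonempty text, phrased with the named step function (definitional)
theorem pvA_eq (text : String) (hlen : ¬ PySem.Str.len text = 0) :
    split_prepared_qna_py text =
      (match pvQnaMarkers.foldl (pvStep (PySem.Str.lower text)) none with
       | none => (text, "")
       | some s => (PySem.Str.slice text none (some s), PySem.Str.slice text (some s) none)) := by
  rw [split_prepared_qna_py, if_neg hlen]
  rfl

theorem pvB_eq (text : String) :
    split_prepared_qna_py_alt text =
      (match pvScan (PySem.Str.lower text).toList 0 with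
       | none => (text, "")
       | some i => (String.ofList (text.toList.take i), String.ofList (text.toList.drop i))) := by
  rw [split_prepared_qna_py_alt]
  simp only [PySem.Str.toList_lower]

-- ===== VERDICT (by name: the statement is the Claim_ definition above) =====
theorem split_prepared_qna_py_spec : Claim_equal_split_prepared_qna_py := by
  intro text _
  show split_prepared_qna_py text = split_prepared_qna_py_alt text
  by_cases hlen : PySem.Str.len text = 0
  · have htxt : text = "" :=
      String.toList_eq_nil_iff.mp (by simpa [PySem.Str.len_eq] using hlen)
    subst htxt
    decide
  · rw [pvA_eq text hlen, pvB_eq text]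
    set lower := PySem.Str.lower text with hlow
    have hfind : ∀ m : String, PySem.Str.find lower m = PySem.Chars.find lower.toList m.toList := by
      intro m; simp
    cases hA : pvQnaMarkers.foldl (pvStep lower) none with
    | none =>
      obtain ⟨-, hall⟩ := pv_foldA_none lower pvQnaMarkers none hA
      cases hB : pvScan lower.toList 0 with
      | none => rfl
      | some k =>
        exfalso
        obtain ⟨-, hhit, -⟩ := pvScan_some lower.toList 0 k hB
        obtain ⟨m, hm, hpre⟩ := (pv_hit_iff _).mp hhit
        exact pv_find_neg_no_occ lower.toList m.toList k
          (by rw [← hfind]; exact hall m hm) hpre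
    | some v =>
      obtain ⟨h1, h2, -⟩ := pv_foldA_some lower pvQnaMarkers none v hA
      rcases h1 with h1 | ⟨m0, hm0, hf0, hvne⟩
      · exact absurd h1 (by simp)
      · have hv0 : 0 ≤ v := by
          have := PySem.Chars.neg_one_le_find lower.toList m0.toList
          rw [← hfind] at this
          omega
        have hf0' : PySem.Chars.find lower.toList m0.toList = v := by rw [← hfind]; exact hf0
        have hspec0 := PySem.Chars.find_spec (s := lower.toList) (sub := m0.toList) (by rw [hf0']; exact hv0)
        rw [hf0'] at hspec0
        cases hB : pvScan lower.toList 0 with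
        | none =>
          exfalso
          have hno := pvScan_none lower.toList 0 hB v.toNat
          have hyes : pvAnyMarkerAt (lower.toList.drop v.toNat) = true :=
            (pv_hit_iff _).mpr ⟨m0, hm0, hspec0.1⟩
          rw [hno] at hyes
          exact Bool.false_ne_true hyes
        | some k =>
          obtain ⟨-, hhit, hbelow⟩ := pvScan_some lower.toList 0 k hB
          simp only [Nat.sub_zero] at hhit hbelow
          have hkv : k = v.toNat := by
            have hle1 : v.toNat ≤ k := by
              by_contra hlt
              obtain ⟨m, hm, hpre⟩ := (pv_hit_iff _).mp hhit
              rcases h2 m hm with hneg | hge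
              · exact pv_find_neg_no_occ lower.toList m.toList k
                  (by rw [← hfind]; exact hneg) hpre
              · rw [hfind] at hge
                have hspecm := PySem.Chars.find_spec (s := lower.toList) (sub := m.toList) (by omega)
                exact hspecm.2 k (by omega) hpre
            have hle2 : k ≤ v.toNat := by
              by_contra hlt
              have hyes : pvAnyMarkerAt (lower.toList.drop v.toNat) = true :=
                (pv_hit_iff _).mpr ⟨m0, hm0, hspec0.1⟩
              have hno := hbelow v.toNat (by omega)
              rw [hno] at hyes
              exact Bool.false_ne_true hyes
            omega
          subst hkv
          refine Prod.ext ?_ ?_ <;> apply String.toList_inj.mp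
          · simp [PySem.List.slice_to text.toList hv0]
          · simp [PySem.List.slice_from text.toList hv0]
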